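-- pv_equiv track=rewrite | github.com/nursoulqxw/pp2-kbtu | lab3/8.py | solve
-- ===== SOURCE A (Python) =====
-- def solve(a):
--     ok = False
--     for i in range(len(a) - 2):
--         if a[i] == 0:
--             if a[i + 1] == 0:
--                 if a[i + 2] == 7:
--                     ok = True
--                     break
--     return ok
-- ===== SOURCE B (Python) =====
-- def solve(a):
--     zeros = 0  # number of consecutive zeros seen so far, capped at 2
--     for x in a:
--         if x == 0:
--             zeros = min(zeros + 1, 2)
--         elif x == 7 and zeros >= 2:
--             return True
--         else:
--             zeros = 0
--     return False
-- ===== Notes on version B (the rewrite author's own statement) =====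
-- stated objective: alternative
-- what changed: Replaces the index-based window scan (a[i],a[i+1],a[i+2] over range(len(a)-2)) by a single forward pass over the elements with a capped consecutive-zero counter state machine.
import Mathlib
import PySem

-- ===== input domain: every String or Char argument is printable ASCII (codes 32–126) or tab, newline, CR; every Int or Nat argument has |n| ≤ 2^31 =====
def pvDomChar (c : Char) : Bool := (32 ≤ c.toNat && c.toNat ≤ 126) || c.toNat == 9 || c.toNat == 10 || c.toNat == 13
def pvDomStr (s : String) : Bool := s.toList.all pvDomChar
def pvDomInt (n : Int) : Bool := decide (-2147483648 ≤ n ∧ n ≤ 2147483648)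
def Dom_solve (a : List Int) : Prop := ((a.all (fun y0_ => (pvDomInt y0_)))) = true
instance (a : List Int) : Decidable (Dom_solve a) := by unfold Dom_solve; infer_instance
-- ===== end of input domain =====

-- B replaces the index-window scan of A by a single element pass with a capped consecutive-zero counter; alternative decomposition, same cost.


-- ===== PORT A =====
def solveLoopA (a : List Int) : List Int → Bool
  | [] => false
  | i :: rest =>
    if PySem.List.pyGet? a i = some 0 then
      if PySem.List.pyGet? a (i + 1) = some 0 then
        if PySem.List.pyGet? a (i + 2) = some 7 then true
        else solveLoopA a rest
      else solveLoopA a rest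
    else solveLoopA a rest

def solve (a : List Int) : Bool :=
  solveLoopA a (PySem.List.pyRange 0 ((a.length : Int) - 2) 1)

-- ===== PORT B =====
def solveGo : Int → List Int → Bool
  | _, [] => false
  | zeros, x :: rest =>
    if x = 0 then solveGo (min (zeros + 1) 2) rest
    else if x = 7 ∧ 2 ≤ zeros then true
    else solveGo 0 rest

def solve_alt (a : List Int) : Bool := solveGo 0 a

-- ===== PRECONDITION & SPEC =====
def Spec_solve (a : List Int) (out : Bool) : Prop := out = solve_alt a
instance (a : List Int) (out : Bool) : Decidable (Spec_solve a out) := by unfold Spec_solve; infer_instance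

-- ===== CLAIM (what is proved, stated in full; the proofs are below) =====
def Claim_equal_solve : Prop := ∀ (a : List Int), Dom_solve a → Spec_solve a (solve a)

-- ===== LEMMAS AND PROOFS =====

/-- Reference predicate: some three consecutive entries are 0, 0, 7. -/
def hasPat : List Int → Bool
  | x :: y :: z :: t => if x = 0 ∧ y = 0 ∧ z = 7 then true else hasPat (y :: z :: t)
  | _ => false

lemma hasPat_cons_ne {x : Int} (hx : x ≠ 0) (l : List Int) :
    hasPat (x :: l) = hasPat l := by
  match l with
  | [] => simp [hasPat]
  | [y] => simp [hasPat]
  | y :: z :: t => simp [hasPat, hx]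

lemma pyGet?_shift (x : Int) (t : List Int) (c : Int) (hc : 0 ≤ c) :
    PySem.List.pyGet? (x :: t) (c + 1) = PySem.List.pyGet? t c := by
  have h : c = ((c.toNat : Int)) := (Int.toNat_of_nonneg hc).symm
  rw [h, PySem.List.pyGet?_cons_succ]

lemma loopA_shift (x : Int) (t : List Int) :
    ∀ (n : Nat) (c : Int), 0 ≤ c →
      solveLoopA (x :: t) (PySem.List.pyRange (c + 1) (c + 1 + n) 1) =
      solveLoopA t (PySem.List.pyRange c (c + n) 1) := by
  intro n
  induction n with
  | zero =>
    intro c _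
    rw [PySem.List.pyRange_one_eq_nil (by omega), PySem.List.pyRange_one_eq_nil (by omega)]
    rfl
  | succ n ih =>
    intro c hc
    push_cast
    rw [PySem.List.pyRange_one_cons (by omega : c + 1 < c + 1 + ((n : Int) + 1)),
        PySem.List.pyRange_one_cons (by omega : c < c + ((n : Int) + 1)),
        (show c + 1 + ((n : Int) + 1) = (c + 1) + 1 + n by ring),
        (show c + ((n : Int) + 1) = (c + 1) + n by ring)]
    simp only [solveLoopA]
    rw [(show c + 1 + 2 = (c + 2) + 1 by ring), pyGet?_shift x t c hc,
        pyGet?_shift x t (c + 1) (by omega), pyGet?_shift x t (c + 2) (by omega),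
        ih (c + 1) (by omega)]

lemma solveA_eq_hasPat : ∀ a : List Int, solve a = hasPat a := by
  intro a
  match a with
  | [] => simp [solve, hasPat, PySem.List.pyRange_one_eq_nil, solveLoopA]
  | [x] => simp [solve, hasPat, PySem.List.pyRange_one_eq_nil, solveLoopA]
  | [x, y] => simp [solve, hasPat, PySem.List.pyRange_one_eq_nil, solveLoopA]
  | x :: y :: z :: t =>
    have hcons : PySem.List.pyRange 0 ((x :: y :: z :: t).length - 2 : Int) 1 =
        0 :: PySem.List.pyRange 1 ((x :: y :: z :: t).length - 2 : Int) 1 := by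
      rw [PySem.List.pyRange_one_cons (by simp; omega)]; norm_num
    have g0 : PySem.List.pyGet? (x :: y :: z :: t) 0 = some x := PySem.List.pyGet?_zero_cons _ _
    have g1 : PySem.List.pyGet? (x :: y :: z :: t) (0 + 1) = some y := by
      rw [pyGet?_shift _ _ 0 le_rfl]; exact PySem.List.pyGet?_zero_cons _ _
    have g2 : PySem.List.pyGet? (x :: y :: z :: t) (0 + 2) = some z := by
      rw [(by ring : (0 : Int) + 2 = 1 + 1), pyGet?_shift _ _ 1 (by omega),
          (by ring : (1 : Int) = 0 + 1), pyGet?_shift _ _ 0 le_rfl]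
      exact PySem.List.pyGet?_zero_cons _ _
    have tail : solveLoopA (x :: y :: z :: t)
          (PySem.List.pyRange 1 ((x :: y :: z :: t).length - 2 : Int) 1) =
        hasPat (y :: z :: t) := by
      have sh := loopA_shift x (y :: z :: t) t.length 0 le_rfl
      rw [(by ring : (0 : Int) + 1 = 1)] at sh
      rw [(by simp; ring_nf :
            (1 : Int) + t.length = ((x :: y :: z :: t).length : Int) - 2)] at sh
      rw [(by simp; ring_nf :
            (0 : Int) + t.length = ((y :: z :: t).length : Int) - 2)] at sh
      rw [sh]
      exact solveA_eq_hasPat (y :: z :: t)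
    by_cases hp : x = 0 ∧ y = 0 ∧ z = 7
    · obtain ⟨hx, hy, hz⟩ := hp
      subst hx; subst hy; subst hz
      rw [solve, hcons]
      simp only [solveLoopA]
      rw [g0, g1, g2]
      simp [hasPat]
    · have hne : hasPat (x :: y :: z :: t) = hasPat (y :: z :: t) := by
        simp [hasPat, hp]
      rw [solve, hcons, hne]
      simp only [solveLoopA, g0, g1, g2]
      by_cases hx : x = 0 <;> by_cases hy : y = 0 <;> by_cases hz : z = 7 <;>
        simp_all
termination_by a => a.length

lemma solveGo_eq_hasPat : ∀ (l : List Int) (s : Int), s = 0 ∨ s = 1 ∨ s = 2 →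
    solveGo s l = hasPat (List.replicate s.toNat 0 ++ l) := by
  intro l
  induction l with
  | nil =>
    rintro s (rfl | rfl | rfl) <;> simp [solveGo, hasPat, List.replicate]
  | cons x rest ih =>
    rintro s (rfl | rfl | rfl)
    · by_cases hx : x = 0
      · subst hx
        simpa [solveGo, List.replicate] using ih 1 (by omega)
      · rw [show List.replicate (0 : Int).toNat 0 ++ x :: rest = x :: rest by simp,
            hasPat_cons_ne hx]
        have h7 : ¬ (x = 7 ∧ (2 : Int) ≤ 0) := by omega
        simp only [solveGo, hx, if_false, h7]
        simpa [List.replicate] using ih 0 (by omega)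
    · by_cases hx : x = 0
      · subst hx
        simpa [solveGo, List.replicate] using ih 2 (by omega)
      · have h1 : List.replicate (1 : Int).toNat (0 : Int) ++ x :: rest = 0 :: x :: rest := rfl
        have h2 : hasPat (0 :: x :: rest) = hasPat rest := by
          match rest with
          | [] => simp [hasPat]
          | z :: t =>
            rw [show hasPat (0 :: x :: z :: t) = hasPat (x :: z :: t) by simp [hasPat, hx],
                hasPat_cons_ne hx]
        have h7 : ¬ (x = 7 ∧ (2 : Int) ≤ 1) := by omega
        rw [h1, h2]
        simp only [solveGo, hx, if_false, h7]
        simpa [List.replicate] using ih 0 (by omega)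
    · have hrep : List.replicate (2 : Int).toNat (0 : Int) = [0, 0] := rfl
      by_cases hx : x = 0
      · subst hx
        have h3 : hasPat ([0, 0] ++ (0 : Int) :: rest) = hasPat ([0, 0] ++ rest) := by
          simp [hasPat]
        rw [hrep, h3]
        simpa [solveGo] using ih 2 (by omega)
      · by_cases h7 : x = 7
        · subst h7
          simp [solveGo, hasPat]
        · have hp : hasPat ([0, 0] ++ x :: rest) = hasPat rest := by
            have s1 : hasPat (0 :: 0 :: x :: rest) = hasPat (0 :: x :: rest) := by
              simp [hasPat, h7]
            have s2 : hasPat (0 :: x :: rest) = hasPat rest := by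
              match rest with
              | [] => simp [hasPat]
              | z :: t =>
                rw [show hasPat (0 :: x :: z :: t) = hasPat (x :: z :: t) by simp [hasPat, hx],
                    hasPat_cons_ne hx]
            simpa [s1] using s2
          have h27 : ¬ (x = 7 ∧ (2 : Int) ≤ 2) := by simp [h7]
          rw [hrep, hp]
          simp only [solveGo, hx, if_false, h27]
          simpa [List.replicate] using ih 0 (by omega)

-- ===== VERDICT (by name: the statement is the Claim_ definition above) =====
theorem solve_spec : Claim_equal_solve := by
  intro a _
  unfold Spec_solve solve_alt
  rw [solveA_eq_hasPat a, solveGo_eq_hasPat a 0 (by omega)]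
  simp
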